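-- pv_equiv track=rewrite | github.com/913-Herlea-Stefan-Alexandru/Facultate | An1 Facultate/FP/Exam Preparation/prime.py | divide_prime
-- ===== SOURCE A (Python) =====
-- def prime(n):
--     """
--     Finds out if the given number is prime
--     :param n: (int) the given number
--     :return: True if the number is prime, False otherwise
--     """
--     for d in range(2, n//2 + 1):
--         if n % d == 0:
--             return False
--     return True
--
-- def divide_prime(set, left, right):
--     """
--     The function finds and returns the largest prime number found on an even position in the list
--     We assume that 0 is an even number
--     :param set: (list) the given list of elements
--     :param left: (int) the left bound of the list
--     :param right: (int) the right bound of the list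
--     :return: the largest prime number found on an even position in the list or None if no such number is found
--     """
--     if left >= right:
--         if right % 2 != 0:
--             return None
--         if not prime(set[right]):
--             return None
--         return set[right]
--     m = (left+right)//2
--
--     n1 = divide_prime(set, left, m)
--     n2 = divide_prime(set, m+1, right)
--
--     if None not in [n1, n2]:
--         return max(n1, n2)
--     if n1 == None:
--         return n2
--     if n2 == None:
--         return n1
-- ===== SOURCE B (Python) =====
-- def _no_small_factor(n):
--     # same acceptance set as A's `prime` (True for all n < 2 as well),
--     # but trial division stops at sqrt(n) instead of n//2
--     d = 2
--     while d * d <= n: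
--         if n % d == 0:
--             return False
--         d += 1
--     return True
--
--
-- def divide_prime(set, left, right):
--     # single linear scan over the even indices of [lo, right] instead of
--     # A's divide-and-conquer recursion; primality by sqrt-bounded trial division
--     lo = right if left >= right else left
--     if lo % 2 != 0:
--         lo += 1
--     best = None
--     i = lo
--     while i <= right:
--         v = set[i]
--         if _no_small_factor(v) and (best is None or v > best):
--             best = v
--         i += 2
--     return best
-- ===== Notes on version B (the rewrite author's own statement) =====
-- stated objective: alternative
-- what changed: Replaces A's divide-and-conquer recursion over [left,right] (with trial division of each candidate up to n//2) by a single linear while-loop over the even indices that keeps a running maximum, testing candidates by trial division only up to sqrt(n) while keeping A's convention that every n < 2 passes the test.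
import Mathlib
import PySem

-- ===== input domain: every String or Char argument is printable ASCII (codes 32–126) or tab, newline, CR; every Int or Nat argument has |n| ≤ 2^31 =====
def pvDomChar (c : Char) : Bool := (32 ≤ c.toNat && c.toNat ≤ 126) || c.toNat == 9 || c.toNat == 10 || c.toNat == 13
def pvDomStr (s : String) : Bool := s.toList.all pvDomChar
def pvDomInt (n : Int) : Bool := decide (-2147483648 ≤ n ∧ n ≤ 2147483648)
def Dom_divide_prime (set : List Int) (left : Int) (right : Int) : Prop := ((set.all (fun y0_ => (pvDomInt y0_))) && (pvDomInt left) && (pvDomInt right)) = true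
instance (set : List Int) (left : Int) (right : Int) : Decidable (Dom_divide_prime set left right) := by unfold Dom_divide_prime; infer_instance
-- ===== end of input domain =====

-- B replaces A's divide-and-conquer recursion (with trial division up to n//2) by a single
-- linear while-loop over the even indices with sqrt-bounded trial division; objective: alternative.

-- ===== PORT A =====
-- A's `prime`: for d in range(2, n//2 + 1): if n % d == 0: return False; return True
def primeA (n : Int) : Bool :=
  (PySem.List.pyRange 2 (PySem.Int.floordiv n 2 + 1) 1).all (fun d => !(PySem.Int.mod n d == 0))

def divide_prime (set : List Int) (left : Int) (right : Int) : Option Int :=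
  if left ≥ right then
    if PySem.Int.mod right 2 ≠ 0 then none
    else
      match PySem.List.pyGet? set right with
      | none => none        -- IndexError in Python; excluded by Pre_
      | some v => if !primeA v then none else some v
  else
    let m := PySem.Int.floordiv (left + right) 2
    let n1 := divide_prime set left m
    let n2 := divide_prime set (m + 1) right
    match n1, n2 with
    | some a, some b => some (max a b)     -- None not in [n1,n2]: max(n1,n2)
    | none, _ => n2                        -- n1 == None: return n2
    | _, none => n1                        -- n2 == None: return n1
termination_by (right - left).toNat
decreasing_by
  · have h2 := (PySem.Int.floordiv_lt_iff_lt_mul (a := left + right) (b := 2) (q := right) (by omega)).mpr (by omega)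
    omega
  · have h1 := (PySem.Int.le_floordiv_iff_mul_le (a := left + right) (b := 2) (q := left) (by omega)).mpr (by omega)
    omega

-- ===== PORT B =====
-- Source B's `_no_small_factor`: while d*d <= n: …
def noSmallFactorAux (n : Int) (d : Int) : Bool :=
  if d * d ≤ n then
    if PySem.Int.mod n d == 0 then false
    else noSmallFactorAux n (d + 1)
  else true
termination_by (n + 1 - d).toNat
decreasing_by
  have hdn : d ≤ n := by rcases le_or_gt d 0 with h | h <;> nlinarith
  omega

def noSmallFactor (n : Int) : Bool := noSmallFactorAux n 2

-- Source B's while-loop over i = lo, lo+2, … ≤ right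
def altLoop (set : List Int) (right : Int) (i : Int) (best : Option Int) : Option Int :=
  if i ≤ right then
    let best' :=
      match PySem.List.pyGet? set i with
      | none => best        -- IndexError in Python; excluded by Pre_
      | some v =>
          if noSmallFactor v && (match best with | none => true | some b => decide (b < v)) then
            some v
          else best
    altLoop set right (i + 2) best'
  else best
termination_by (right + 1 - i).toNat

def divide_prime_alt (set : List Int) (left : Int) (right : Int) : Option Int :=
  let lo0 := if left ≥ right then right else left
  let lo := if PySem.Int.mod lo0 2 ≠ 0 then lo0 + 1 else lo0
  altLoop set right lo none

-- ===== PRECONDITION & SPEC =====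
-- Pre_ excludes exactly the inputs where Python A raises IndexError: some even index in the
-- visited interval (the singleton {right} when left ≥ right, else [left, right]) is out of
-- range; the visited even indices are contiguous, so it suffices to bound the first and last.
def Pre_divide_prime (set : List Int) (left : Int) (right : Int) : Prop :=
  let lo := if left ≥ right then right else left
  let firstEven := if lo % 2 = 0 then lo else lo + 1      -- least even index visited
  let lastEven := if right % 2 = 0 then right else right - 1  -- greatest even index visited
  firstEven > right ∨
    (-(set.length : Int) ≤ firstEven ∧ lastEven < (set.length : Int))
instance (set : List Int) (left : Int) (right : Int) : Decidable (Pre_divide_prime set left right) := by unfold Pre_divide_prime; infer_instance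

def pvWitness_divide_prime : List Int × Int × Int := ([4, 7, 10, 3, 2], 0, 4)

def Spec_divide_prime (set : List Int) (left : Int) (right : Int) (out : Option Int) : Prop := out = divide_prime_alt set left right
instance (set : List Int) (left : Int) (right : Int) (out : Option Int) : Decidable (Spec_divide_prime set left right out) := by unfold Spec_divide_prime; infer_instance

-- ===== CLAIM (what is proved, stated in full; the proofs are below) =====
def Claim_equal_divide_prime : Prop := ∀ (set : List Int) (left : Int) (right : Int), Dom_divide_prime set left right → Pre_divide_prime set left right → Spec_divide_prime set left right (divide_prime set left right)

-- ===== LEMMAS AND PROOFS =====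

-- combination used by A (Python's max over two Optional values, None dropped)
def omax : Option Int → Option Int → Option Int
  | some a, some b => some (max a b)
  | none, b => b
  | a, none => a

-- per-index candidate: the value at even index i if A's primality test accepts it
def cand (set : List Int) (i : Int) : Option Int :=
  if PySem.Int.mod i 2 = 0 then
    match PySem.List.pyGet? set i with
    | none => none
    | some v => if primeA v then some v else none
  else none

-- reference value: omax-fold of the candidates over [lo, hi]
def best (set : List Int) (lo hi : Int) : Option Int :=
  (PySem.List.pyRange lo (hi + 1) 1).foldl (fun acc i => omax acc (cand set i)) none

theorem omax_none_right (a : Option Int) : omax a none = a := by cases a <;> rfl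

theorem omax_assoc (a b c : Option Int) : omax (omax a b) c = omax a (omax b c) := by
  cases a <;> cases b <;> cases c <;> simp [omax, max_assoc]

theorem foldl_omax_init (set : List Int) (xs : List Int) (a : Option Int) :
    xs.foldl (fun acc i => omax acc (cand set i)) a
      = omax a (xs.foldl (fun acc i => omax acc (cand set i)) none) := by
  induction xs generalizing a with
  | nil => simp [List.foldl, omax_none_right]
  | cons x xs ih =>
      simp only [List.foldl]
      rw [ih (omax a (cand set x)), ih (omax none (cand set x)), omax_assoc]
      rfl

theorem best_split (set : List Int) (lo m hi : Int) (h1 : lo ≤ m + 1) (h2 : m ≤ hi) :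
    best set lo hi = omax (best set lo m) (best set (m + 1) hi) := by
  unfold best
  rw [PySem.List.pyRange_one_append lo (m + 1) (hi + 1) h1 (by omega), List.foldl_append,
    foldl_omax_init set (PySem.List.pyRange (m + 1) (hi + 1) 1)]

theorem best_single (set : List Int) (r : Int) : best set r r = cand set r := by
  unfold best
  rw [PySem.List.pyRange_one_singleton]
  simp [List.foldl, omax]

-- A computes the reference value
theorem divide_prime_eq_best (set : List Int) (l r : Int) :
    divide_prime set l r = best set (if l ≥ r then r else l) r := by
  by_cases hlr : l ≥ r
  · rw [divide_prime, if_pos hlr, if_pos hlr, best_single]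
    unfold cand
    by_cases hm : PySem.Int.mod r 2 = 0
    · rw [if_neg (not_not_intro hm), if_pos hm]
      cases PySem.List.pyGet? set r with
      | none => rfl
      | some v => cases hv : primeA v <;> simp [hv]
    · rw [if_pos hm, if_neg hm]
  · have hlt : l < r := by omega
    have hm1 := (PySem.Int.le_floordiv_iff_mul_le (a := l + r) (b := 2) (q := l) (by omega)).mpr (by omega)
    have hm2 := (PySem.Int.floordiv_lt_iff_lt_mul (a := l + r) (b := 2) (q := r) (by omega)).mpr (by omega)
    rw [divide_prime, if_neg hlr, if_neg hlr]
    have ih1 := divide_prime_eq_best set l (PySem.Int.floordiv (l + r) 2)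
    have ih2 := divide_prime_eq_best set (PySem.Int.floordiv (l + r) 2 + 1) r
    set m := PySem.Int.floordiv (l + r) 2 with hm
    have e1 : divide_prime set l m = best set l m := by
      rw [ih1]; rcases eq_or_lt_of_le hm1 with h | h
      · rw [if_pos (by omega), h]
      · rw [if_neg (by omega)]
    have e2 : divide_prime set (m + 1) r = best set (m + 1) r := by
      rw [ih2]; rcases eq_or_lt_of_le (show m + 1 ≤ r by omega) with h | h
      · rw [if_pos (by omega), h]
      · rw [if_neg (by omega)]
    rw [best_split set l m r (by omega) (by omega)]
    simp only [e1, e2]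
    cases best set l m <;> cases best set (m + 1) r <;> rfl
termination_by (r - l).toNat
decreasing_by
  · have h1 := (PySem.Int.le_floordiv_iff_mul_le (a := l + r) (b := 2) (q := l) (by omega)).mpr (by omega)
    have h2 := (PySem.Int.floordiv_lt_iff_lt_mul (a := l + r) (b := 2) (q := r) (by omega)).mpr (by omega)
    omega
  · have h1 := (PySem.Int.le_floordiv_iff_mul_le (a := l + r) (b := 2) (q := l) (by omega)).mpr (by omega)
    omega

-- the two primality tests accept the same integers
theorem noSmallFactorAux_spec (n d : Int) (hd : 0 < d) :
    noSmallFactorAux n d = true ↔ ∀ e, d ≤ e → e * e ≤ n → PySem.Int.mod n e ≠ 0 := by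
  rw [noSmallFactorAux.eq_def]
  by_cases hg : d * d ≤ n
  · rw [if_pos hg]
    by_cases hz : PySem.Int.mod n d == 0
    · simp only [hz]
      constructor
      · intro h; exact absurd h (by simp)
      · intro h; exact absurd (by simpa using hz) (h d le_rfl hg)
    · rw [if_neg (by simpa using hz)]
      rw [noSmallFactorAux_spec n (d + 1) (by omega)]
      constructor
      · intro h e hde hee
        rcases eq_or_lt_of_le hde with rfl | h' 
        · simpa using hz
        · exact h e (by omega) hee
      · intro h e hde hee; exact h e (by omega) hee
  · rw [if_neg hg]
    constructor
    · intro _ e hde hee hmod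
      nlinarith
    · intro _; rfl
termination_by (n + 1 - d).toNat
decreasing_by
  have hdn : d ≤ n := by rcases le_or_gt d 0 with h | h <;> nlinarith
  omega

theorem primeA_spec (n : Int) :
    primeA n = true ↔ ∀ e, 2 ≤ e → e ≤ PySem.Int.floordiv n 2 → PySem.Int.mod n e ≠ 0 := by
  unfold primeA
  rw [List.all_eq_true]
  constructor
  · intro h e h2 hle
    have := h e (by rw [PySem.List.mem_pyRange_one]; omega)
    simpa using this
  · intro h e he
    rw [PySem.List.mem_pyRange_one] at he
    simpa using h e he.1 (by omega)

theorem primeA_eq_noSmallFactor (n : Int) : primeA n = noSmallFactor n := by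
  unfold noSmallFactor
  rcases hA : primeA n <;> rcases hB : noSmallFactorAux n 2
  · rfl
  · -- primeA false, loop true: derive contradiction
    exfalso
    have hAspec : ¬ ∀ e, 2 ≤ e → e ≤ PySem.Int.floordiv n 2 → PySem.Int.mod n e ≠ 0 := by
      rw [← primeA_spec]; simp [hA]
    push_neg at hAspec
    obtain ⟨e, h2, hle, hmod⟩ := hAspec
    have h2n : e * 2 ≤ n := (PySem.Int.le_floordiv_iff_mul_le (by omega)).mp hle
    have hdvd : e ∣ n := (PySem.Int.mod_eq_zero_iff_dvd n e).mp hmod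
    obtain ⟨k, hk⟩ := hdvd
    have hk2 : 2 ≤ k := by nlinarith
    have hspec := (noSmallFactorAux_spec n 2 (by omega)).mp hB
    rcases le_total e k with h | h
    · exact hspec e h2 (by nlinarith) hmod
    · refine hspec k hk2 (by nlinarith) ?_
      rw [PySem.Int.mod_eq_zero_iff_dvd]
      exact ⟨e, by linarith [hk]⟩
  · -- primeA true, loop false: contradiction
    exfalso
    have hBspec : ¬ ∀ e, 2 ≤ e → e * e ≤ n → PySem.Int.mod n e ≠ 0 := by
      rw [← noSmallFactorAux_spec n 2 (by omega)]; simp [hB]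
    push_neg at hBspec
    obtain ⟨e, h2, hee, hmod⟩ := hBspec
    have := (primeA_spec n).mp hA
    refine this e h2 ?_ hmod
    rw [PySem.Int.le_floordiv_iff_mul_le (by omega)]
    nlinarith
  · rfl

theorem mod_two_add_two (i : Int) (h : PySem.Int.mod i 2 = 0) : PySem.Int.mod (i + 2) 2 = 0 := by
  rw [PySem.Int.mod_eq_emod_of_pos (by omega)] at h ⊢
  omega

-- B's loop computes the omax-fold of the candidates, starting from any even index
theorem altLoop_eq_best (set : List Int) (r i : Int) (acc : Option Int)
    (hev : PySem.Int.mod i 2 = 0) :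
    altLoop set r i acc
      = (PySem.List.pyRange i (r + 1) 1).foldl (fun a j => omax a (cand set j)) acc := by
  rw [altLoop]
  by_cases h : i ≤ r
  · rw [if_pos h, PySem.List.pyRange_one_cons (by omega)]
    simp only [List.foldl]
    have hstep :
        (match PySem.List.pyGet? set i with
          | none => acc
          | some v =>
              if noSmallFactor v && (match acc with | none => true | some b => decide (b < v)) then
                some v
              else acc)
        = omax acc (cand set i) := by
      unfold cand
      rw [if_pos hev]
      cases hg : PySem.List.pyGet? set i with
      | none => simp [omax_none_right]
      | some v =>
          simp only [← primeA_eq_noSmallFactor]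
          cases hp : primeA v
          · simp [omax_none_right]
          · cases acc with
            | none => simp [omax]
            | some b =>
                by_cases hbv : b < v
                · simp [hbv, omax, max_eq_right (le_of_lt hbv)]
                · simp [hbv, omax, max_eq_left (by omega : v ≤ b)]
    rw [hstep]
    by_cases h2 : i + 1 ≤ r
    · rw [PySem.List.pyRange_one_cons (a := i + 1) (by omega)]
      simp only [List.foldl]
      have hodd : cand set (i + 1) = none := by
        unfold cand
        rw [if_neg]
        rw [PySem.Int.mod_eq_emod_of_pos (by omega)] at hev ⊢
        omega
      rw [hodd, omax_none_right, show i + 1 + 1 = i + 2 from by ring]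
      exact altLoop_eq_best set r (i + 2) _ (mod_two_add_two i hev)
    · rw [PySem.List.pyRange_one_eq_nil (by omega)]
      simp only [List.foldl]
      rw [altLoop_eq_best set r (i + 2) _ (mod_two_add_two i hev),
        PySem.List.pyRange_one_eq_nil (by omega)]
      rfl
  · rw [if_neg h, PySem.List.pyRange_one_eq_nil (by omega)]
    rfl
termination_by (r + 1 - i).toNat

theorem divide_prime_alt_eq_best (set : List Int) (l r : Int) :
    divide_prime_alt set l r = best set (if l ≥ r then r else l) r := by
  have hbody : divide_prime_alt set l r
      = altLoop set r
          (if PySem.Int.mod (if l ≥ r then r else l) 2 ≠ 0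
            then (if l ≥ r then r else l) + 1 else (if l ≥ r then r else l)) none := rfl
  rw [hbody]
  set lo0 := if l ≥ r then r else l with hlo0
  unfold best
  by_cases hev : PySem.Int.mod lo0 2 = 0
  · rw [if_neg (not_not_intro hev), altLoop_eq_best set r lo0 none hev]
  · rw [if_pos hev]
    have hev1 : PySem.Int.mod (lo0 + 1) 2 = 0 := by
      rw [PySem.Int.mod_eq_emod_of_pos (by omega)] at hev ⊢
      omega
    rw [altLoop_eq_best set r (lo0 + 1) none hev1]
    by_cases h : lo0 ≤ r
    · rw [PySem.List.pyRange_one_cons (a := lo0) (by omega)]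
      simp only [List.foldl]
      have hodd : cand set lo0 = none := by unfold cand; rw [if_neg hev]
      rw [hodd, omax_none_right]
    · rw [PySem.List.pyRange_one_eq_nil (b := r + 1) (by omega),
        PySem.List.pyRange_one_eq_nil (by omega)]

-- ===== VERDICT (by name: the statement is the Claim_ definition above) =====
theorem divide_prime_spec : Claim_equal_divide_prime := by
  intro set l r _ _
  unfold Spec_divide_prime
  rw [divide_prime_eq_best, divide_prime_alt_eq_best]
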